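-- pv_equiv track=rewrite | github.com/Raha-R8/Threes_game | part5.py | count_zero_down
-- ===== SOURCE A (Python) =====
-- def count_zero_down(mat,k1,d1):
--     count = -1
--     count_index = -1
--     dc ={}
--     for i in mat[0]:
--         count_index+=1
--         if i==0:
--             count+=1
--             dc[count] = count_index
--     m = count+1
--     zero_num = k1%m
--     for j in dc.keys():
--         if j==zero_num:
--             change = dc[j]
--     mat[0][change]=d1
--     return mat
-- ===== SOURCE B (Python) =====
-- def _set_nth_zero(row, z, d):
--     # return a copy of row with its z-th zero (0-based) replaced by d
--     if not row:
--         return []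
--     x = row[0]
--     if x == 0:
--         if z == 0:
--             return [d] + row[1:]
--         return [x] + _set_nth_zero(row[1:], z - 1, d)
--     return [x] + _set_nth_zero(row[1:], z, d)
--
-- def count_zero_down(mat, k1, d1):
--     m = 0
--     for x in mat[0]:
--         if x == 0:
--             m += 1
--     zero_num = k1 % m
--     mat[0] = _set_nth_zero(mat[0], zero_num, d1)
--     return mat
-- ===== Notes on version B (the rewrite author's own statement) =====
-- stated objective: simpler
-- what changed: B counts the zeros of the first row and then rebuilds that row recursively, replacing the (k1 % m)-th zero directly, instead of building an ordinal-to-column dict and scanning all its keys for the match.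
import Mathlib
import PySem

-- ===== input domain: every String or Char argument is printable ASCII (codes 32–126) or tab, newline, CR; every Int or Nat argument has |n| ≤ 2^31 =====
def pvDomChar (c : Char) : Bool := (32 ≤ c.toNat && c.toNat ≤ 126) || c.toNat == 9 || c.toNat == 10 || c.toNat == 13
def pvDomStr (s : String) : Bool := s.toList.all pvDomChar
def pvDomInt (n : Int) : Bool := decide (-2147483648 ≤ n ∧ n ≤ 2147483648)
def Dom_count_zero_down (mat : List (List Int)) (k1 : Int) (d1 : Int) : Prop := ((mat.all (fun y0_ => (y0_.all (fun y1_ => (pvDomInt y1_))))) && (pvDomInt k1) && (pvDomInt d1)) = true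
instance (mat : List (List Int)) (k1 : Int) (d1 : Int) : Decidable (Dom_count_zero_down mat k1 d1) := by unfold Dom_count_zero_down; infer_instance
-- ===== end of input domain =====

-- B replaces A's ordinal→column dict (built, then scanned over all keys) by a zero count
-- followed by a direct recursive rebuild of the first row; equivalence is about the RETURN
-- value (both Pythons also mutate `mat` so the returned object is the argument).

-- ===== PORT A =====
-- literal transliteration: the for-loop is a foldl over (count, count_index, dc);
-- `change` starts at 0 only as the Lean default for Python's unbound variable — under
-- Pre_ the key loop always assigns it.
def count_zero_down (mat : List (List Int)) (k1 : Int) (d1 : Int) : List (List Int) :=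
  match mat with
  | [] => []   -- Python: mat[0] raises IndexError (excluded by Pre_)
  | row :: rest =>
    let st := row.foldl
      (fun (s : Int × Int × PySem.Dict Int Int) i =>
        if i == 0 then (s.1 + 1, s.2.1 + 1, s.2.2.insert (s.1 + 1) (s.2.1 + 1))
        else (s.1, s.2.1 + 1, s.2.2))
      (-1, -1, PySem.Dict.empty)
    let count := st.1
    let dc := st.2.2
    let m := count + 1
    let zero_num := PySem.Int.mod k1 m   -- Python raises ZeroDivisionError when m = 0 (excluded by Pre_)
    let change := dc.keys.foldl (fun ch j => if j == zero_num then dc.getD j 0 else ch) 0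
    PySem.List.pySetD row change d1 :: rest

-- ===== PORT B =====
def setNthZero : List Int → Int → Int → List Int
  | [], _, _ => []
  | x :: xs, z, d =>
    if x == 0 then
      (if z == 0 then d :: xs else x :: setNthZero xs (z - 1) d)
    else x :: setNthZero xs z d

def count_zero_down_alt (mat : List (List Int)) (k1 : Int) (d1 : Int) : List (List Int) :=
  match mat with
  | [] => []   -- Python: mat[0] raises IndexError (excluded by Pre_)
  | row :: rest =>
    let m : Int := row.foldl (fun acc x => if x == 0 then acc + 1 else acc) 0
    let zero_num := PySem.Int.mod k1 m   -- ZeroDivisionError when m = 0 (excluded by Pre_)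
    setNthZero row zero_num d1 :: rest

-- ===== PRECONDITION & SPEC =====
-- Pre_ excludes exactly the inputs where the Python A raises: an empty mat (IndexError on
-- mat[0]) and a first row without any zero (ZeroDivisionError on k1 % 0).
def Pre_count_zero_down (mat : List (List Int)) (k1 : Int) (d1 : Int) : Prop :=
  mat ≠ [] ∧ (0 : Int) ∈ mat.headD []
instance (mat : List (List Int)) (k1 : Int) (d1 : Int) : Decidable (Pre_count_zero_down mat k1 d1) := by unfold Pre_count_zero_down; infer_instance

def pvWitness_count_zero_down : List (List Int) × Int × Int := ([[1, 0, 0, 2], [3, 4]], 5, 7)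

def Spec_count_zero_down (mat : List (List Int)) (k1 : Int) (d1 : Int) (out : List (List Int)) : Prop := out = count_zero_down_alt mat k1 d1
instance (mat : List (List Int)) (k1 : Int) (d1 : Int) (out : List (List Int)) : Decidable (Spec_count_zero_down mat k1 d1 out) := by unfold Spec_count_zero_down; infer_instance

-- ===== CLAIM (what is proved, stated in full; the proofs are below) =====
def Claim_equal_count_zero_down : Prop := ∀ (mat : List (List Int)) (k1 : Int) (d1 : Int), Dom_count_zero_down mat k1 d1 → Pre_count_zero_down mat k1 d1 → Spec_count_zero_down mat k1 d1 (count_zero_down mat k1 d1)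

-- ===== LEMMAS AND PROOFS =====

-- the (ordinal, column) pairs A's first loop inserts, starting from count = c, count_index = i
def zPairs : List Int → Int → Int → List (Int × Int)
  | [], _, _ => []
  | x :: xs, c, i =>
    if x = 0 then (c + 1, i + 1) :: zPairs xs (c + 1) (i + 1) else zPairs xs c (i + 1)

-- column of the z-th zero of the row (meaningful for 0 ≤ z < number of zeros)
def nthZeroCol : List Int → Int → Int
  | [], _ => 0
  | x :: xs, z =>
    if x = 0 then (if z = 0 then 0 else nthZeroCol xs (z - 1) + 1) else nthZeroCol xs z + 1

theorem zPairs_cons_zero (xs : List Int) (c i : Int) :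
    zPairs (0 :: xs) c i = (c + 1, i + 1) :: zPairs xs (c + 1) (i + 1) := by
  simp [zPairs]

theorem zPairs_cons_ne (x : Int) (xs : List Int) (c i : Int) (hx : x ≠ 0) :
    zPairs (x :: xs) c i = zPairs xs c (i + 1) := by
  simp [zPairs, hx]

theorem nthZeroCol_cons_zero_zero (xs : List Int) :
    nthZeroCol (0 :: xs) 0 = 0 := by simp [nthZeroCol]

theorem nthZeroCol_cons_zero_succ (xs : List Int) (z : Int) (hz : z ≠ 0) :
    nthZeroCol (0 :: xs) z = nthZeroCol xs (z - 1) + 1 := by simp [nthZeroCol, hz]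

theorem nthZeroCol_cons_ne (x : Int) (xs : List Int) (z : Int) (hx : x ≠ 0) :
    nthZeroCol (x :: xs) z = nthZeroCol xs z + 1 := by simp [nthZeroCol, hx]

theorem nthZeroCol_nonneg (row : List Int) (z : Int) : 0 ≤ nthZeroCol row z := by
  induction row generalizing z with
  | nil => simp [nthZeroCol]
  | cons x xs ih =>
    simp only [nthZeroCol]
    split_ifs with h1 h2
    · omega
    · have := ih (z - 1); omega
    · have := ih z; omega

-- A's first loop, characterised: counts, and appends exactly zPairs to the dict items
theorem foldA_eq (row : List Int) (c i : Int) (dc : PySem.Dict Int Int)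
    (hk : ∀ k ∈ dc.keys, k ≤ c) :
    row.foldl
      (fun (s : Int × Int × PySem.Dict Int Int) x =>
        if x == 0 then (s.1 + 1, s.2.1 + 1, s.2.2.insert (s.1 + 1) (s.2.1 + 1))
        else (s.1, s.2.1 + 1, s.2.2))
      (c, i, dc)
    = (c + (row.count 0 : Int), i + (row.length : Int),
       PySem.Dict.mk (dc.items ++ zPairs row c i)) := by
  induction row generalizing c i dc with
  | nil => simp [zPairs]
  | cons x xs ih =>
    by_cases hx : x = 0
    · subst hx
      have hnc : dc.contains (c + 1) = false := by
        by_contra h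
        have hmem : (c + 1) ∈ dc.keys :=
          (PySem.Dict.contains_iff_mem_keys dc (c + 1)).mp (by simpa using h)
        have := hk _ hmem; omega
      have hins : (dc.insert (c + 1) (i + 1)).items = dc.items ++ [(c + 1, i + 1)] :=
        PySem.Dict.items_insert_of_not_contains dc (i + 1) hnc
      have hk' : ∀ k ∈ (dc.insert (c + 1) (i + 1)).keys, k ≤ c + 1 := by
        intro k hkm
        rcases (PySem.Dict.mem_keys_insert dc (c + 1) k (i + 1)).mp hkm with h | h
        · omega
        · have := hk _ h; omega
      simp only [List.foldl_cons, beq_self_eq_true, if_true]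
      rw [ih (c + 1) (i + 1) _ hk', hins, zPairs_cons_zero]
      simp only [List.count_cons, beq_self_eq_true, if_true, List.length_cons,
        List.append_assoc, List.singleton_append, Prod.mk.injEq]
      refine ⟨by push_cast; ring, by push_cast; ring, trivial⟩
    · have hxb : (x == 0) = false := by simpa using hx
      simp only [List.foldl_cons, hxb, Bool.false_eq_true, if_false]
      rw [ih c (i + 1) dc hk, zPairs_cons_ne x xs c i hx]
      simp only [List.count_cons, hxb, Bool.false_eq_true, if_false, List.length_cons,
        Prod.mk.injEq]
      refine ⟨rfl, by push_cast; ring, trivial⟩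

-- every ordinal c < z ≤ c + #zeros is a key of zPairs
theorem mem_zPairs_keys (row : List Int) (c i z : Int)
    (h1 : c < z) (h2 : z ≤ c + (row.count 0 : Int)) :
    z ∈ (zPairs row c i).map Prod.fst := by
  induction row generalizing c i with
  | nil => simp [List.count_nil] at h2; omega
  | cons x xs ih =>
    by_cases hx : x = 0
    · subst hx
      rw [zPairs_cons_zero]
      simp only [List.map_cons, List.mem_cons]
      by_cases hz : z = c + 1
      · exact Or.inl hz
      · refine Or.inr (ih (c + 1) (i + 1) (by omega) ?_)
        simp only [List.count_cons, beq_self_eq_true, if_true] at h2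
        push_cast at h2 ⊢
        omega
    · rw [zPairs_cons_ne x xs c i hx]
      refine ih c (i + 1) h1 ?_
      simp only [List.count_cons] at h2
      have hxb : (x == 0) = false := by simpa using hx
      rw [hxb] at h2
      simpa using h2

-- lookup of ordinal z in the zPairs dict is column i + 1 + nthZeroCol of the (z - c - 1)-th zero
theorem zPairs_getD (row : List Int) (c i z : Int)
    (h1 : c < z) (h2 : z ≤ c + (row.count 0 : Int)) :
    (PySem.Dict.mk (zPairs row c i)).getD z 0 = i + 1 + nthZeroCol row (z - c - 1) := by
  induction row generalizing c i with
  | nil => simp [List.count_nil] at h2; omega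
  | cons x xs ih =>
    by_cases hx : x = 0
    · subst hx
      rw [zPairs_cons_zero, PySem.Dict.getD_eq_get?_getD, PySem.Dict.get?_mk_cons]
      by_cases hz : z = c + 1
      · subst hz
        rw [show ((c + 1 : Int) == c + 1) = true from by simp]
        rw [show ((c : Int) + 1 - c - 1) = 0 from by ring, nthZeroCol_cons_zero_zero]
        simp
      · have hne : ((c + 1 : Int) == z) = false := by simpa using (fun h => hz h.symm)
        rw [hne]
        simp only [Bool.false_eq_true, if_false]
        rw [← PySem.Dict.getD_eq_get?_getD]
        have h2' : z ≤ c + 1 + (xs.count 0 : Int) := by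
          simp only [List.count_cons, beq_self_eq_true, if_true] at h2
          push_cast at h2 ⊢; omega
        rw [ih (c + 1) (i + 1) (by omega) h2']
        rw [nthZeroCol_cons_zero_succ xs (z - c - 1) (by omega)]
        rw [show (z - (c + 1) - 1) = z - c - 1 - 1 from by ring]
        ring
    · rw [zPairs_cons_ne x xs c i hx]
      have h2' : z ≤ c + (xs.count 0 : Int) := by
        simp only [List.count_cons] at h2
        have hxb : (x == 0) = false := by simpa using hx
        rw [hxb] at h2
        simpa using h2
      rw [ih c (i + 1) h1 h2', nthZeroCol_cons_ne x xs (z - c - 1) hx]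
      ring

-- A's key loop: any occurrence of z gives the same value, so membership is enough
theorem keyloop_not_mem (ks : List Int) (z ch0 : Int) (f : Int → Int) (h : z ∉ ks) :
    ks.foldl (fun ch j => if j == z then f j else ch) ch0 = ch0 := by
  induction ks generalizing ch0 with
  | nil => rfl
  | cons k ks ih =>
    simp only [List.mem_cons, not_or] at h
    have hne : (k == z) = false := by simpa using (Ne.symm h.1)
    simp only [List.foldl_cons, hne, Bool.false_eq_true, if_false]
    exact ih ch0 h.2

theorem keyloop_mem (ks : List Int) (z ch0 : Int) (f : Int → Int) (h : z ∈ ks) :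
    ks.foldl (fun ch j => if j == z then f j else ch) ch0 = f z := by
  induction ks generalizing ch0 with
  | nil => simp at h
  | cons k ks ih =>
    by_cases hz : z ∈ ks
    · simp only [List.foldl_cons]; exact ih _ hz
    · have hk : k = z := by
        rcases List.mem_cons.mp h with h' | h'
        · exact h'.symm
        · exact absurd h' hz
      subst hk
      simp only [List.foldl_cons, beq_self_eq_true, if_true]
      exact keyloop_not_mem ks k (f k) f hz

-- B's recursive rebuild equals setting the nthZeroCol-th element
theorem setNthZero_eq (row : List Int) (z d : Int)
    (h0 : 0 ≤ z) (h1 : z < (row.count 0 : Int)) :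
    setNthZero row z d = PySem.List.pySetD row (nthZeroCol row z) d := by
  induction row generalizing z with
  | nil => simp [List.count_nil] at h1; omega
  | cons x xs ih =>
    by_cases hx : x = 0
    · subst hx
      by_cases hz : z = 0
      · subst hz
        simp [setNthZero, nthZeroCol_cons_zero_zero, PySem.List.pySetD_of_nonneg]
      · have hzb : (z == 0) = false := by simpa using hz
        simp only [setNthZero, beq_self_eq_true, if_true, hzb, Bool.false_eq_true, if_false]
        have h1' : z - 1 < (xs.count 0 : Int) := by
          simp only [List.count_cons, beq_self_eq_true, if_true] at h1
          push_cast at h1 ⊢; omega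
        rw [ih (z - 1) (by omega) h1']
        rw [nthZeroCol_cons_zero_succ xs z hz]
        have hnn := nthZeroCol_nonneg xs (z - 1)
        rw [PySem.List.pySetD_of_nonneg _ _ hnn, PySem.List.pySetD_of_nonneg _ _ (by omega)]
        have ht : (nthZeroCol xs (z - 1) + 1).toNat = (nthZeroCol xs (z - 1)).toNat + 1 := by omega
        simp [ht]
    · have hxb : (x == 0) = false := by simpa using hx
      simp only [setNthZero, hxb, Bool.false_eq_true, if_false]
      have h1' : z < (xs.count 0 : Int) := by
        simp only [List.count_cons, hxb, Bool.false_eq_true, if_false] at h1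
        exact h1
      rw [ih z h0 h1', nthZeroCol_cons_ne x xs z hx]
      have hnn := nthZeroCol_nonneg xs z
      rw [PySem.List.pySetD_of_nonneg _ _ hnn, PySem.List.pySetD_of_nonneg _ _ (by omega)]
      have ht : (nthZeroCol xs z + 1).toNat = (nthZeroCol xs z).toNat + 1 := by omega
      simp [ht]

-- B's counting loop is List.count
theorem countB_eq (row : List Int) :
    row.foldl (fun acc x => if x == 0 then acc + 1 else acc) (0 : Int) = (row.count 0 : Int) := by
  have h := PySem.List.foldl_beq_add_one (l := row) (v := (0 : Int)) (a := (0 : Int))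
  simpa using h

-- ===== VERDICT (by name: the statement is the Claim_ definition above) =====
theorem count_zero_down_spec : Claim_equal_count_zero_down := by
  intro mat k1 d1 _ hpre
  obtain ⟨hne, hmem⟩ := hpre
  match mat with
  | [] => exact absurd rfl hne
  | row :: rest =>
    simp only [List.headD_cons] at hmem
    have hcnt : 0 < (row.count 0 : Int) := by
      have := List.count_pos_iff.mpr hmem
      exact_mod_cast this
    unfold Spec_count_zero_down count_zero_down count_zero_down_alt
    simp only
    rw [foldA_eq row (-1) (-1) PySem.Dict.empty (by simp [PySem.Dict.keys_empty])]
    rw [countB_eq]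
    have hemp : (PySem.Dict.empty : PySem.Dict Int Int).items = [] := rfl
    rw [hemp, List.nil_append]
    have hm : (-1 : Int) + (row.count 0 : Int) + 1 = (row.count 0 : Int) := by ring
    rw [hm]
    set z := PySem.Int.mod k1 (row.count 0 : Int) with hz
    have hz0 : 0 ≤ z := PySem.Int.mod_nonneg k1 hcnt
    have hzlt : z < (row.count 0 : Int) := PySem.Int.mod_lt k1 hcnt
    have hkeys : z ∈ (PySem.Dict.mk (zPairs row (-1) (-1))).keys := by
      have h := mem_zPairs_keys row (-1) (-1) z (by omega) (by omega)
      simpa [PySem.Dict.keys] using h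
    rw [keyloop_mem _ z 0 (fun j => (PySem.Dict.mk (zPairs row (-1) (-1))).getD j 0) hkeys]
    rw [zPairs_getD row (-1) (-1) z (by omega) (by omega)]
    rw [setNthZero_eq row z d1 hz0 hzlt]
    have : (-1 : Int) + 1 + nthZeroCol row (z - (-1) - 1) = nthZeroCol row z := by
      have : z - (-1) - 1 = z := by ring
      rw [this]; ring
    rw [this]
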